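-- pv_equiv track=rewrite | github.com/TeonaB/Limbaje-formale-si-automate | main.py | verificaCuvant
-- ===== SOURCE A (Python) =====
-- def verificaCuvant(gramatica, simbol, cuvant):
--     if len(cuvant) == 0:
--         for regula in gramatica:
--             if regula[0] == simbol and regula[2] == "x":
--                 return True
--         return False
--     if len(cuvant) == 1:
--         for regula in gramatica:
--             if regula[0] == simbol and regula[2] == cuvant[0] and len(regula)<=3:
--                 return True
--     for regula in gramatica:
--         if regula[0] == simbol and regula[2] == cuvant[0] and len(regula)>3:
--             if verificaCuvant(gramatica, regula[4], cuvant[1:]):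
--                 return True
--     return False
-- ===== SOURCE B (Python) =====
-- def verificaCuvant(gramatica, simbol, cuvant):
--     # Bottom-up DP (NFA-style reachability): sweep the word right-to-left,
--     # maintaining the SET of symbols that derive the current suffix; one pass
--     # over the grammar per position, stopping early once the set is empty.
--     # Malformed (too short) rules are skipped.
--     S = {r[0] for r in gramatica if len(r) > 2 and r[2] == "x"}
--     first = True  # are we at the last position of the word?
--     for c in reversed(cuvant):
--         T = set()
--         for r in gramatica:
--             if len(r) > 2 and r[2] == c:
--                 if len(r) <= 3:
--                     if first:
--                         T.add(r[0])
--                 elif len(r) > 4 and r[4] in S: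
--                     T.add(r[0])
--         S = T
--         first = False
--         if not S:
--             break
--     return simbol in S
-- ===== Notes on version B (the rewrite author's own statement) =====
-- stated objective: alternative
-- what changed: Replaced A's branching recursion over (symbol, suffix) by a right-to-left DP sweep that maintains the set of all symbols deriving the current suffix (one grammar pass per position, early exit on the empty set), skipping malformed (too short) rules instead of indexing into them.
-- outside the precondition, e.g. on verificaCuvant([['S', '->', 'a', '|']], 'S', ''): A returns False, B returns False; on verificaCuvant([['S', '->', 'a', '|']], 'S', 'a'): A raises IndexError, B returns False
import Mathlib
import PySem

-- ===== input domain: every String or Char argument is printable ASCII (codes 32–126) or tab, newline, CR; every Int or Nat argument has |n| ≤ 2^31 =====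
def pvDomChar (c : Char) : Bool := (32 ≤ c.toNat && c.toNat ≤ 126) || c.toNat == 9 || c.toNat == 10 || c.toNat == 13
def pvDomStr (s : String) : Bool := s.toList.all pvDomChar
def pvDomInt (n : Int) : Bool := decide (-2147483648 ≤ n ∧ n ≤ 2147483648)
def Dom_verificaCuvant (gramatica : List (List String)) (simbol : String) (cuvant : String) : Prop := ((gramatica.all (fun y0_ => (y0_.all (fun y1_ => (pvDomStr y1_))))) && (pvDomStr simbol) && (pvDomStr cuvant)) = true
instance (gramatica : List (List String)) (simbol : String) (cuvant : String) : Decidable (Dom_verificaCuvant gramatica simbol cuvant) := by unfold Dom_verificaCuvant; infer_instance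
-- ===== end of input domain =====

-- B replaces A's branching recursion over (symbol, suffix) by a right-to-left
-- deriver-set DP sweep, one grammar pass per position with early exit on the
-- empty set, skipping malformed rules (objective: alternative).

-- rule[i] with Python semantics; inside Pre_ every index A's code accesses is in
-- range, so the "" default is never consulted there.
def pvGetS (r : List String) (i : Int) : String := (PySem.List.pyGet? r i).getD ""

-- ===== PORT A =====
-- A's recursion on (simbol, cuvant); each for-with-early-return-True is List.any.
def vCuvA (g : List (List String)) (simbol : String) : List Char → Bool
  | [] => g.any fun r => pvGetS r 0 == simbol && pvGetS r 2 == "x"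
  | c :: rest =>
    (if rest.isEmpty then
       g.any fun r => pvGetS r 0 == simbol && pvGetS r 2 == String.ofList [c] && decide (r.length ≤ 3)
     else false)
    || g.any fun r => pvGetS r 0 == simbol && pvGetS r 2 == String.ofList [c] && decide (3 < r.length) && vCuvA g (pvGetS r 4) rest

def verificaCuvant (gramatica : List (List String)) (simbol : String) (cuvant : String) : Bool :=
  vCuvA gramatica simbol cuvant.toList

-- ===== PORT B =====
-- the initial set: symbols with an epsilon ("x") rule
def vCuvBeps (g : List (List String)) : PySem.Set String :=
  PySem.Set.ofList (g.filterMap fun r =>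
    if decide (2 < r.length) && pvGetS r 2 == "x" then some (pvGetS r 0) else none)

-- body of B's inner 'for r in gramatica' loop, producing the next set T
def vCuvBstep (g : List (List String)) (c : Char) (S : PySem.Set String) (first : Bool) : PySem.Set String :=
  g.foldl (fun T r =>
    if decide (2 < r.length) && pvGetS r 2 == String.ofList [c] then
      if r.length ≤ 3 then
        (if first then PySem.Set.add T (pvGetS r 0) else T)
      else
        (if decide (4 < r.length) && PySem.Set.contains S (pvGetS r 4) then PySem.Set.add T (pvGetS r 0) else T)
    else T) PySem.Set.empty

-- B's 'for c in reversed(cuvant)' loop with its early 'break' on the empty set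
def vCuvBgo (g : List (List String)) : List Char → PySem.Set String → Bool → PySem.Set String
  | [], S, _ => S
  | c :: cs, S, first =>
      let T := vCuvBstep g c S first
      if T.isEmpty then T else vCuvBgo g cs T false

def verificaCuvant_alt (gramatica : List (List String)) (simbol : String) (cuvant : String) : Bool :=
  PySem.Set.contains (vCuvBgo gramatica cuvant.toList.reverse (vCuvBeps gramatica) true) simbol

-- ===== PRECONDITION & SPEC =====
-- Pre_ excludes grammars containing a malformed rule (length other than 3 or ≥ 5,
-- i.e. one A would index out of range) whose head symbol is reachable (the start
-- symbol or the continuation symbol of some long rule): there the Python A raises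
-- IndexError on most words.  It is slightly narrower than A's exact return domain
-- (A still returns when the malformed reachable rule is never consulted past its
-- head — see cites); B skips malformed rules and always returns.
def ruleOK (g : List (List String)) (s0 : String) (r : List String) : Prop :=
  r.length = 3 ∨ 5 ≤ r.length ∨
    (r ≠ [] ∧ pvGetS r 0 ≠ s0 ∧ ∀ r' ∈ g, 4 < r'.length → pvGetS r 0 ≠ pvGetS r' 4)

def Pre_verificaCuvant (gramatica : List (List String)) (simbol : String) (cuvant : String) : Prop :=
  ∀ r ∈ gramatica, ruleOK gramatica simbol r
instance (gramatica : List (List String)) (simbol : String) (cuvant : String) : Decidable (Pre_verificaCuvant gramatica simbol cuvant) := by unfold Pre_verificaCuvant; unfold ruleOK; infer_instance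

def pvWitness_verificaCuvant : List (List String) × String × String :=
  ([["S", "->", "a", "|", "A"], ["A", "->", "b"]], "S", "ab")

def Spec_verificaCuvant (gramatica : List (List String)) (simbol : String) (cuvant : String) (out : Bool) : Prop := out = verificaCuvant_alt gramatica simbol cuvant
instance (gramatica : List (List String)) (simbol : String) (cuvant : String) (out : Bool) : Decidable (Spec_verificaCuvant gramatica simbol cuvant out) := by unfold Spec_verificaCuvant; infer_instance

-- ===== CLAIM (what is proved, stated in full; the proofs are below) =====
def Claim_equal_verificaCuvant : Prop := ∀ (gramatica : List (List String)) (simbol : String) (cuvant : String), Dom_verificaCuvant gramatica simbol cuvant → Pre_verificaCuvant gramatica simbol cuvant → Spec_verificaCuvant gramatica simbol cuvant (verificaCuvant gramatica simbol cuvant)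

-- ===== LEMMAS AND PROOFS =====

-- proof-side view of B's sweep: the deriver set of each suffix
def vCuvBsets (g : List (List String)) : List Char → PySem.Set String
  | [] => vCuvBeps g
  | c :: rest => vCuvBstep g c (vCuvBsets g rest) rest.isEmpty

-- B's loop without the early break (proof-side)
def vCuvBrun (g : List (List String)) : List Char → PySem.Set String → Bool → PySem.Set String
  | [], S, _ => S
  | c :: cs, S, first => vCuvBrun g cs (vCuvBstep g c S first) false

-- a non-first step from the empty set stays empty
theorem step_empty (g : List (List String)) (c : Char) :
    vCuvBstep g c [] false = [] := by
  unfold vCuvBstep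
  induction g with
  | nil => rfl
  | cons r g ih =>
      simp only [List.foldl_cons]
      convert ih using 2
      by_cases h2 : (decide (2 < r.length) && pvGetS r 2 == String.ofList [c]) = true
      · rw [if_pos h2]
        by_cases h3 : r.length ≤ 3
        · rw [if_pos h3, if_neg (by simp)]
        · rw [if_neg h3, if_neg (by simp [PySem.Set.contains])]
      · rw [if_neg h2]

theorem run_empty (g : List (List String)) (cs : List Char) :
    vCuvBrun g cs [] false = [] := by
  induction cs with
  | nil => rfl
  | cons c cs ih => simp only [vCuvBrun, step_empty, ih]

-- the early break does not change the resulting set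
theorem go_eq_run (g : List (List String)) (cs : List Char) :
    ∀ (S : PySem.Set String) (first : Bool), vCuvBgo g cs S first = vCuvBrun g cs S first := by
  induction cs with
  | nil => intro S first; rfl
  | cons c cs ih =>
      intro S first
      simp only [vCuvBgo, vCuvBrun]
      by_cases hT : (vCuvBstep g c S first).isEmpty
      · rw [if_pos hT, List.isEmpty_iff.mp hT, run_empty]
      · rw [if_neg hT, ih]

-- running over an appended chunk splits
theorem run_append (g : List (List String)) (u v : List Char) :
    ∀ (S : PySem.Set String) (f : Bool),
      vCuvBrun g (u ++ v) S f = vCuvBrun g v (vCuvBrun g u S f) (if u.isEmpty then f else false) := by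
  induction u with
  | nil => intro S f; simp [vCuvBrun]
  | cons a u ih =>
      intro S f
      simp only [List.cons_append, vCuvBrun, ih, List.isEmpty_cons]
      by_cases hu : u.isEmpty = true <;> simp [hu]

-- the full reversed run computes exactly the suffix deriver sets
theorem run_rev_eq_sets (g : List (List String)) (w : List Char) :
    vCuvBrun g w.reverse (vCuvBeps g) true = vCuvBsets g w := by
  induction w with
  | nil => rfl
  | cons c rest ih =>
      rw [List.reverse_cons, run_append, ih]
      simp only [vCuvBrun, vCuvBsets, List.isEmpty_reverse]
      by_cases hr : rest.isEmpty <;> simp [hr]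

-- a symbol A's recursion can ever be called with
def pvAdm (g : List (List String)) (s0 σ : String) : Prop :=
  σ = s0 ∨ ∃ r' ∈ g, 4 < r'.length ∧ σ = pvGetS r' 4

-- under Pre_, a grammar rule whose head is a reachable symbol is well formed
theorem lenOK (g : List (List String)) (s0 : String) (r : List String)
    (hpre : ∀ r ∈ g, ruleOK g s0 r) (hr : r ∈ g) (σ : String)
    (hadm : pvAdm g s0 σ) (h0 : pvGetS r 0 = σ) :
    r.length = 3 ∨ 5 ≤ r.length := by
  rcases hpre r hr with h | h | ⟨-, hne, hall⟩
  · exact Or.inl h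
  · exact Or.inr h
  · exfalso
    rcases hadm with rfl | ⟨r', hr', hlen', rfl⟩
    · exact hne h0
    · exact hall r' hr' hlen' h0

-- membership in a fold of conditional Set.adds
theorem mem_foldl_condAdd (g : List (List String)) (p : List String → Bool)
    (s : String) (T₀ : PySem.Set String) :
    (s ∈ g.foldl (fun T r => if p r then PySem.Set.add T (pvGetS r 0) else T) T₀) ↔
      s ∈ T₀ ∨ ∃ r ∈ g, p r = true ∧ s = pvGetS r 0 := by
  induction g generalizing T₀ with
  | nil => simp
  | cons r g ih =>
      simp only [List.foldl_cons, ih, List.mem_cons]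
      by_cases hp : p r = true
      · simp only [if_pos hp, PySem.Set.mem_add]
        constructor
        · rintro ((h | h) | ⟨x, hx, hp', hs⟩)
          · exact Or.inl h
          · exact Or.inr ⟨r, Or.inl rfl, hp, h⟩
          · exact Or.inr ⟨x, Or.inr hx, hp', hs⟩
        · rintro (h | ⟨x, (rfl | hx), hp', hs⟩)
          · exact Or.inl (Or.inl h)
          · exact Or.inl (Or.inr hs)
          · exact Or.inr ⟨x, hx, hp', hs⟩
      · simp only [if_neg hp]
        constructor
        · rintro (h | ⟨x, hx, hp', hs⟩)
          · exact Or.inl h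
          · exact Or.inr ⟨x, Or.inr hx, hp', hs⟩
        · rintro (h | ⟨x, (rfl | hx), hp', hs⟩)
          · exact Or.inl h
          · exact absurd hp' hp
          · exact Or.inr ⟨x, hx, hp', hs⟩

-- the two bodies of the per-character step coincide
theorem step_body_eq (c : Char) (first : Bool) (S : PySem.Set String) :
    (fun (T : PySem.Set String) (r : List String) =>
      if decide (2 < r.length) && pvGetS r 2 == String.ofList [c] then
        if r.length ≤ 3 then
          (if first = true then PySem.Set.add T (pvGetS r 0) else T)
        else
          (if decide (4 < r.length) && PySem.Set.contains S (pvGetS r 4) then PySem.Set.add T (pvGetS r 0) else T)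
      else T)
    = (fun (T : PySem.Set String) (r : List String) =>
      if ((decide (2 < r.length) && pvGetS r 2 == String.ofList [c]) &&
          (if r.length ≤ 3 then first
           else decide (4 < r.length) && PySem.Set.contains S (pvGetS r 4)))
      then PySem.Set.add T (pvGetS r 0) else T) := by
  funext T r
  by_cases h2 : (decide (2 < r.length) && (pvGetS r 2 == String.ofList [c])) = true
  · by_cases h3 : r.length ≤ 3
    · by_cases hre : first = true
      · simp [h2, h3, hre]
      · simp [h2, h3, hre]
    · simp [h2, h3]
  · simp [h2]

-- core equivalence: on reachable symbols, A's recursion answers membership in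
-- B's deriver set
theorem vCuvA_eq_mem (g : List (List String)) (s0 : String)
    (hpre : ∀ r ∈ g, ruleOK g s0 r) (w : List Char) :
    ∀ σ : String, pvAdm g s0 σ →
      vCuvA g σ w = PySem.Set.contains (vCuvBsets g w) σ := by
  induction w with
  | nil =>
      intro σ hadm
      rw [Bool.eq_iff_iff]
      simp only [vCuvA, vCuvBsets, vCuvBeps, List.any_eq_true, PySem.Set.contains_iff,
        PySem.Set.mem_ofList, List.mem_filterMap, Bool.and_eq_true, beq_iff_eq,
        decide_eq_true_eq, and_assoc]
      constructor
      · rintro ⟨r, hr, h0, h2⟩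
        have hlen : 2 < r.length := by
          rcases lenOK g s0 r hpre hr σ hadm h0 with h | h <;> omega
        refine ⟨r, hr, ?_⟩
        rw [if_pos (by simp [hlen, h2])]
        exact congrArg some h0
      · rintro ⟨r, hr, h⟩
        split at h
        · rename_i hcond
          exact ⟨r, hr, Option.some_inj.mp h, hcond.2⟩
        · exact absurd h (by simp)
  | cons c rest ih =>
      intro σ hadm
      rw [Bool.eq_iff_iff]
      simp only [vCuvA, vCuvBsets, vCuvBstep, step_body_eq]
      rw [PySem.Set.contains_iff, mem_foldl_condAdd]
      simp only [PySem.Set.empty, List.not_mem_nil, false_or, Bool.or_eq_true,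
        List.any_eq_true, Bool.and_eq_true, beq_iff_eq, decide_eq_true_eq, and_assoc]
      constructor
      · rintro (h | h)
        · split at h
          · rename_i hresto
            simp only [List.any_eq_true, Bool.and_eq_true, beq_iff_eq,
              decide_eq_true_eq, and_assoc] at h
            obtain ⟨r, hr, h0, h2, h3⟩ := h
            have hlen : 2 < r.length := by
              rcases lenOK g s0 r hpre hr σ hadm h0 with h | h <;> omega
            refine ⟨r, hr, hlen, h2, ?_, h0.symm⟩
            rw [if_pos h3]
            exact hresto
          · exact absurd h (by simp)
        · obtain ⟨r, hr, h0, h2, h3, hrec⟩ := h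
          have hlen : 5 ≤ r.length := by
            rcases lenOK g s0 r hpre hr σ hadm h0 with h | h <;> omega
          refine ⟨r, hr, by omega, h2, ?_, h0.symm⟩
          rw [if_neg (by omega)]
          rw [ih (pvGetS r 4) (show pvAdm g s0 (pvGetS r 4) from Or.inr ⟨r, hr, by omega, rfl⟩)] at hrec
          simp only [Bool.and_eq_true, decide_eq_true_eq]
          exact ⟨by omega, hrec⟩
      · rintro ⟨r, hr, hlen2, h2, hcond, hs⟩
        by_cases h3 : r.length ≤ 3
        · rw [if_pos h3] at hcond
          left
          rw [if_pos hcond]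
          simp only [List.any_eq_true, Bool.and_eq_true, beq_iff_eq,
            decide_eq_true_eq, and_assoc]
          exact ⟨r, hr, hs.symm, h2, h3⟩
        · rw [if_neg h3] at hcond
          simp only [Bool.and_eq_true, decide_eq_true_eq] at hcond
          obtain ⟨hlen4, hmem⟩ := hcond
          right
          refine ⟨r, hr, hs.symm, h2, by omega, ?_⟩
          rw [ih (pvGetS r 4) (show pvAdm g s0 (pvGetS r 4) from Or.inr ⟨r, hr, hlen4, rfl⟩)]
          exact hmem

-- ===== VERDICT (by name: the statement is the Claim_ definition above) =====
theorem verificaCuvant_spec : Claim_equal_verificaCuvant := by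
  intro g s w _ hpre
  unfold Spec_verificaCuvant verificaCuvant verificaCuvant_alt
  rw [go_eq_run, run_rev_eq_sets]
  exact vCuvA_eq_mem g s hpre w.toList s (Or.inl rfl)
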